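-- pv_equiv track=rewrite | github.com/981377660LMT/algorithm-study | tmp/346/3.py | isPu
-- ===== SOURCE A (Python) =====
-- def isPu(a):
--     A = list(map(int, str(a * a)))
--     n = len(A)
--     dp = [set() for i in range(n + 1)]
--     dp[0].add(0)
--     for i in range(n):
--         cur = 0
--         for j in range(i, n):
--             cur = cur * 10 + A[j]
--             if cur > a:
--                 break
--             dp[j + 1] |= {v + cur for v in dp[i] if v + cur <= a}
--         if a in dp[n]:
--             return True
--     return False
-- ===== SOURCE B (Python) =====
-- def isPu(a):
--     digits = [int(c) for c in str(a * a)]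
--
--     def dfs(rest, rem):
--         if not rest:
--             return rem == 0
--         cur = 0
--         for k in range(len(rest)):
--             cur = cur * 10 + rest[k]
--             if cur > rem:
--                 break
--             if dfs(rest[k + 1:], rem - cur):
--                 return True
--         return False
--
--     return dfs(digits, a)
-- ===== Notes on version B (the rewrite author's own statement) =====
-- stated objective: alternative
-- what changed: A builds a forward dynamic-programming table of sets of reachable partial sums over the digits of a*a; B replaces it with a recursive backtracking search (dfs over split positions building each piece left-to-right, pruned as soon as a piece exceeds the remaining budget).
import Mathlib
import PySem

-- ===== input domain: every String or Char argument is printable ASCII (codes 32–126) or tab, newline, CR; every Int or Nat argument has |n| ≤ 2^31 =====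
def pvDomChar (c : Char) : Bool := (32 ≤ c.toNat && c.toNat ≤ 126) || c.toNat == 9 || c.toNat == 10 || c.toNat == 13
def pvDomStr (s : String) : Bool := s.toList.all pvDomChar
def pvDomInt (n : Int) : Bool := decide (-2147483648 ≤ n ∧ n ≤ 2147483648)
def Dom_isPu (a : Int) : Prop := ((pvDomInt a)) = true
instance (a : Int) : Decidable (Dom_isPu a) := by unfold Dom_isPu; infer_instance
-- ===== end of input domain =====

-- B re-implements A's forward set-of-sums DP as a recursive backtracking search over split
-- positions (same exact results; objective: alternative decomposition, no speed claim).

-- ===== PORT A =====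
-- int(c) for a single decimal-digit character (exact on '0'..'9', the only characters
-- str(a*a) produces since a*a ≥ 0).
def pvDigit (c : Char) : Int := (c.toNat : Int) - 48

-- A = list(map(int, str(a * a)))
def pvDigitsA (a : Int) : List Int := (PySem.Int.toChars (a * a)).map pvDigit

-- inner loop 'for j in range(i, n): cur = cur*10 + A[j]; if cur > a: break; dp[j+1] |= {...}'
-- (fuel = n - j; the set comprehension iterates dp[i], order-independent since it builds a set)
def pvInnerA (a : Int) (L : List Int) (i : Nat) :
    Nat → Nat → Int → List (PySem.Set Int) → List (PySem.Set Int)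
  | 0, _, _, dp => dp
  | fuel + 1, j, cur, dp =>
    let cur' := cur * 10 + L.getD j 0
    if a < cur' then dp
    else
      let s : PySem.Set Int :=
        PySem.Set.ofList (((dp.getD i []).filter (fun v => decide (v + cur' ≤ a))).map
          (fun v => v + cur'))
      pvInnerA a L i fuel (j + 1) cur'
        (dp.set (j + 1) (PySem.Set.union (dp.getD (j + 1) []) s))

-- outer loop 'for i in range(n): …; if a in dp[n]: return True' then 'return False' (fuel = n - i)
def pvOuterA (a : Int) (L : List Int) (n : Nat) :
    Nat → Nat → List (PySem.Set Int) → Bool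
  | 0, _, _ => false
  | fuel + 1, i, dp =>
    let dp' := pvInnerA a L i (n - i) i 0 dp
    if PySem.Set.contains (dp'.getD n []) a then true
    else pvOuterA a L n fuel (i + 1) dp'

def isPu (a : Int) : Bool :=
  let A := pvDigitsA a
  let n := A.length
  let dp0 := (List.replicate (n + 1) (PySem.Set.empty : PySem.Set Int)).set 0
    (PySem.Set.add PySem.Set.empty 0)
  pvOuterA a A n n 0 dp0

-- ===== PORT B =====
-- dfs(rest, rem): recursive backtracking over the first piece of 'rest'
mutual
def pvDfsB : List Int → Int → Bool
  | [], rem => rem == 0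
  | d :: rest, rem => pvLoopB (d :: rest) 0 rem
  termination_by l _ => 2 * l.length + 1
  decreasing_by simp [List.length]

-- the 'for k in range(len(rest))' loop of dfs, consuming the list while building 'cur'
def pvLoopB : List Int → Int → Int → Bool
  | [], _, _ => false
  | d :: t, cur, rem =>
    let cur' := cur * 10 + d
    if rem < cur' then false
    else if pvDfsB t (rem - cur') then true
    else pvLoopB t cur' rem
  termination_by l _ _ => 2 * l.length
  decreasing_by all_goals simp [List.length] <;> omega
end

def isPu_alt (a : Int) : Bool := pvDfsB ((PySem.Int.toChars (a * a)).map pvDigit) a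

-- ===== PRECONDITION & SPEC =====
def Spec_isPu (a : Int) (out : Bool) : Prop := out = isPu_alt a
instance (a : Int) (out : Bool) : Decidable (Spec_isPu a out) := by unfold Spec_isPu; infer_instance

-- ===== CLAIM (what is proved, stated in full; the proofs are below) =====
def Claim_equal_isPu : Prop := ∀ (a : Int), Dom_isPu a → Spec_isPu a (isPu a)

-- ===== LEMMAS AND PROOFS =====

-- value of a digit piece, built left to right starting from 'cur'
def pvVal (cur : Int) (p : List Int) : Int := p.foldl (fun c d => c * 10 + d) cur

-- value of the segment L[i..j] (inclusive)
def pvSeg (L : List Int) (i j : Nat) : Int := pvVal 0 ((L.drop i).take (j + 1 - i))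

-- 'rest can be split into contiguous nonempty pieces, each fitting in the remaining
-- budget, summing to rem' — the specification of B's dfs
inductive pvComp : List Int → Int → Prop
  | nil : pvComp [] 0
  | cons (p q : List Int) (rem : Int) (hp : p ≠ []) (hle : pvVal 0 p ≤ rem)
      (h : pvComp q (rem - pvVal 0 p)) : pvComp (p ++ q) rem

-- 'v is a reachable sum at dp index k' — the specification of A's dp sets
inductive pvReach (L : List Int) (a : Int) : Nat → Int → Prop
  | zero : pvReach L a 0 0
  | step (i j : Nat) (v : Int) (h : pvReach L a i v) (hij : i ≤ j) (hj : j < L.length)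
      (hle : v + pvSeg L i j ≤ a) : pvReach L a (j + 1) (v + pvSeg L i j)

-- pvReach restricted to chains whose LAST segment starts before b: the contents of dp
-- after outer iterations 0..b-1
def pvRB (L : List Int) (a : Int) (b k : Nat) (v : Int) : Prop :=
  (k = 0 ∧ v = 0) ∨
    ∃ i j w, i < b ∧ i ≤ j ∧ j < L.length ∧ k = j + 1 ∧ pvReach L a i w ∧
      v = w + pvSeg L i j ∧ v ≤ a

theorem pvVal_ge (p : List Int) (hp : ∀ d ∈ p, 0 ≤ d) (cur : Int) (hc : 0 ≤ cur) :
    cur ≤ pvVal cur p := by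
  induction p generalizing cur with
  | nil => simp [pvVal]
  | cons d p ih =>
    have hd : 0 ≤ d := hp d (by simp)
    have h1 : cur ≤ cur * 10 + d := by nlinarith
    have h2 := ih (fun x hx => hp x (by simp [hx])) (cur * 10 + d) (by linarith)
    simpa [pvVal] using le_trans h1 h2

theorem pvVal_nonneg (p : List Int) (hp : ∀ d ∈ p, 0 ≤ d) (cur : Int) (hc : 0 ≤ cur) :
    0 ≤ pvVal cur p := le_trans hc (pvVal_ge p hp cur hc)

theorem pvReach_nonneg (L : List Int) (a : Int) (hL : ∀ d ∈ L, 0 ≤ d) (k : Nat) (v : Int)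
    (h : pvReach L a k v) : 0 ≤ v := by
  induction h with
  | zero => exact le_refl 0
  | step i j w h hij hj hle ih =>
    have : 0 ≤ pvSeg L i j := by
      apply pvVal_nonneg _ _ _ le_rfl
      intro d hd
      exact hL d (List.mem_of_mem_drop (List.mem_of_mem_take hd))
    linarith

-- segment values grow with the right endpoint (digits are nonnegative)
theorem pvSeg_mono (L : List Int) (hL : ∀ d ∈ L, 0 ≤ d) (b j j' : Nat) (hb : b ≤ j)
    (hjj : j ≤ j') : pvSeg L b j ≤ pvSeg L b j' := by
  have hsplit : (L.drop b).take (j' + 1 - b) =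
      (L.drop b).take (j + 1 - b) ++ (((L.drop b).drop (j + 1 - b)).take ((j' + 1 - b) - (j + 1 - b))) := by
    rw [← List.take_add]
    congr 1
    omega
  have hmem : ∀ d ∈ (L.drop b).take (j + 1 - b), 0 ≤ d := fun d hd =>
    hL d (List.mem_of_mem_drop (List.mem_of_mem_take hd))
  have hmem2 : ∀ d ∈ ((L.drop b).drop (j + 1 - b)).take ((j' + 1 - b) - (j + 1 - b)), 0 ≤ d :=
    fun d hd => hL d (List.mem_of_mem_drop (List.mem_of_mem_drop (List.mem_of_mem_take hd)))
  unfold pvSeg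
  rw [hsplit]
  unfold pvVal
  rw [List.foldl_append]
  exact pvVal_ge _ hmem2 _ (pvVal_nonneg _ hmem 0 le_rfl)

-- ----- B side: dfs computes pvComp -----

theorem pvComp_inv (l : List Int) (rem : Int) (h : pvComp l rem) :
    (l = [] ∧ rem = 0) ∨
      ∃ p q, l = p ++ q ∧ p ≠ [] ∧ pvVal 0 p ≤ rem ∧ pvComp q (rem - pvVal 0 p) := by
  cases h with
  | nil => exact Or.inl ⟨rfl, rfl⟩
  | cons p q rem hp hle h => exact Or.inr ⟨p, q, rfl, hp, hle, h⟩

theorem pvComp_nil_iff (rem : Int) : pvComp [] rem ↔ rem = 0 := by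
  constructor
  · intro h
    rcases pvComp_inv _ _ h with ⟨-, rfl⟩ | ⟨p, q, hpq, hp, -, -⟩
    · rfl
    · exact absurd (List.append_eq_nil_iff.mp hpq.symm).1 hp
  · rintro rfl; exact pvComp.nil

theorem pvLoopB_iff (t : List Int)
    (hdfs : ∀ q : List Int, q.length < t.length → (∀ d ∈ q, 0 ≤ d) → ∀ rem,
      (pvDfsB q rem = true ↔ pvComp q rem))
    (ht : ∀ d ∈ t, 0 ≤ d) (cur : Int) (hc : 0 ≤ cur) (rem : Int) :
    pvLoopB t cur rem = true ↔
      ∃ p q, t = p ++ q ∧ p ≠ [] ∧ pvVal cur p ≤ rem ∧ pvComp q (rem - pvVal cur p) := by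
  induction t generalizing cur with
  | nil =>
    simp only [pvLoopB]
    constructor
    · intro h; exact absurd h (by simp)
    · rintro ⟨p, q, hpq, hp, -, -⟩
      exact absurd (List.append_eq_nil_iff.mp hpq.symm).1 hp
  | cons d t ih =>
    have hd : 0 ≤ d := ht d (by simp)
    have htt : ∀ x ∈ t, 0 ≤ x := fun x hx => ht x (by simp [hx])
    have hcur' : 0 ≤ cur * 10 + d := by nlinarith
    -- re-shape the right-hand side: the piece starts with d
    have hrhs : (∃ p q, d :: t = p ++ q ∧ p ≠ [] ∧ pvVal cur p ≤ rem ∧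
          pvComp q (rem - pvVal cur p)) ↔
        ((cur * 10 + d ≤ rem ∧ pvComp t (rem - (cur * 10 + d))) ∨
          (∃ p q, t = p ++ q ∧ p ≠ [] ∧ pvVal (cur * 10 + d) p ≤ rem ∧
            pvComp q (rem - pvVal (cur * 10 + d) p))) := by
      constructor
      · rintro ⟨p, q, hpq, hp, hle, h⟩
        match p, hpq with
        | e :: p', hpq =>
          rw [List.cons_append] at hpq
          injection hpq with h1 h2
          subst h1; subst h2
          have hval : pvVal cur (d :: p') = pvVal (cur * 10 + d) p' := rfl
          rw [hval] at hle h
          match p' with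
          | [] => exact Or.inl ⟨by simpa [pvVal] using hle, by simpa [pvVal] using h⟩
          | e' :: p'' => exact Or.inr ⟨e' :: p'', q, rfl, by simp, hle, h⟩
      · rintro (⟨hle, h⟩ | ⟨p, q, rfl, hp, hle, h⟩)
        · exact ⟨[d], t, rfl, by simp, by simpa [pvVal] using hle, by simpa [pvVal] using h⟩
        · exact ⟨d :: p, q, rfl, by simp, hle, h⟩
    rw [hrhs]
    simp only [pvLoopB]
    by_cases hbr : rem < cur * 10 + d
    · rw [if_pos hbr]
      constructor
      · intro h; exact absurd h (by simp)
      · rintro (⟨hle, -⟩ | ⟨p, q, rfl, hp, hle, -⟩)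
        · omega
        · have := pvVal_ge p (fun x hx => htt x (by simp [hx])) _ hcur'
          omega
    · rw [if_neg hbr]
      have hdfs_t := hdfs t (by simp) htt (rem - (cur * 10 + d))
      have ih' := ih (fun q hq hqd rem => hdfs q (by simp; omega) hqd rem) htt
        (cur * 10 + d) hcur'
      by_cases hfound : pvDfsB t (rem - (cur * 10 + d)) = true
      · rw [if_pos hfound]
        simp only [true_iff]
        exact Or.inl ⟨by omega, hdfs_t.mp hfound⟩
      · rw [if_neg hfound]
        rw [ih']
        constructor
        · exact Or.inr
        · rintro (⟨hle, h⟩ | h)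
          · exact absurd (hdfs_t.mpr h) hfound
          · exact h

theorem pvDfsB_iff (t : List Int) (ht : ∀ d ∈ t, 0 ≤ d) (rem : Int) :
    pvDfsB t rem = true ↔ pvComp t rem := by
  have main : ∀ (n : Nat) (t : List Int), t.length ≤ n → (∀ d ∈ t, 0 ≤ d) → ∀ rem,
      (pvDfsB t rem = true ↔ pvComp t rem) := by
    intro n
    induction n with
    | zero =>
      intro t hlen ht rem
      have : t = [] := List.eq_nil_of_length_eq_zero (Nat.le_zero.mp hlen)
      subst this
      simp only [pvDfsB, pvComp_nil_iff, beq_iff_eq]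
    | succ n ih =>
      intro t hlen ht rem
      match t with
      | [] => simp only [pvDfsB, pvComp_nil_iff, beq_iff_eq]
      | d :: rest =>
        simp only [pvDfsB]
        rw [pvLoopB_iff (d :: rest)
          (fun q hq hqd rem => ih q (by simp at hlen hq; omega) hqd rem) ht 0 le_rfl rem]
        constructor
        · rintro ⟨p, q, hpq, hp, hle, h⟩
          rw [hpq]
          exact pvComp.cons p q rem hp hle h
        · intro h
          rcases pvComp_inv _ _ h with ⟨heq, -⟩ | ⟨p, q, hpq, hp, hle, hcomp⟩
          · exact absurd heq (by simp)
          · exact ⟨p, q, hpq, hp, hle, hcomp⟩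
  exact main t.length t le_rfl ht rem

-- ----- bridges between pvReach and pvComp -----

theorem pvReach_to_comp (L : List Int) (a : Int) (h : pvReach L a L.length a) : pvComp L a := by
  have main : ∀ (k : Nat) (v : Int), pvReach L a k v → pvComp (L.drop k) (a - v) → pvComp L a := by
    intro k v h
    induction h with
    | zero => intro h; simpa using h
    | step i j v h hij hj hle ih =>
      intro hc
      apply ih
      have hsplit : L.drop i = (L.drop i).take (j + 1 - i) ++ L.drop (j + 1) := by
        conv_lhs => rw [← List.take_append_drop (j + 1 - i) (L.drop i)]
        rw [List.drop_drop]
        congr 2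
        omega
      have hp : (L.drop i).take (j + 1 - i) ≠ [] := by
        apply List.ne_nil_of_length_pos
        rw [List.length_take, List.length_drop]
        omega
      rw [hsplit]
      have hseg : pvVal 0 ((L.drop i).take (j + 1 - i)) = pvSeg L i j := rfl
      have : a - v - pvSeg L i j = a - (v + pvSeg L i j) := by ring
      exact pvComp.cons _ _ _ hp (by rw [hseg]; omega) (by rw [hseg, this]; exact hc)
  apply main L.length a h
  simp [pvComp.nil]


theorem pvComp_to_reach (L : List Int) (a : Int) (h : pvComp L a) : pvReach L a L.length a := by
  have main : ∀ (l : List Int) (rem : Int), pvComp l rem → ∀ i, i ≤ L.length → l = L.drop i →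
      pvReach L a i (a - rem) → pvReach L a L.length a := by
    intro l rem h
    induction h with
    | nil =>
      intro i hi heq hreach
      have : i = L.length := by
        have := congrArg List.length heq
        rw [List.length_drop] at this
        simp at this
        omega
      subst this
      simpa using hreach
    | cons p q rem hp hle hcomp ih =>
      intro i hi heq hreach
      have hm1 : 1 ≤ p.length := by
        cases p with
        | nil => exact absurd rfl hp
        | cons _ _ => simp
      have hlen : p.length + q.length = L.length - i := by
        have := congrArg List.length heq
        rw [List.length_drop, List.length_append] at this
        omega
      have hq : q = L.drop (i + p.length) := by
        have := congrArg (List.drop p.length) heq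
        rw [List.drop_append_of_le_length le_rfl, List.drop_drop] at this
        simpa [Nat.add_comm] using this
      have hpeq : p = (L.drop i).take p.length := by
        have := congrArg (List.take p.length) heq
        rw [List.take_append_of_le_length le_rfl] at this
        simpa using this
      have hseg : pvSeg L i (i + p.length - 1) = pvVal 0 p := by
        unfold pvSeg
        have harith : i + p.length - 1 + 1 - i = p.length := by omega
        rw [harith, ← hpeq]
      have hij' : i ≤ i + p.length - 1 := by omega
      have hj' : i + p.length - 1 < L.length := by omega
      have hstep : pvReach L a (i + p.length - 1 + 1) ((a - rem) + pvSeg L i (i + p.length - 1)) :=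
        pvReach.step i (i + p.length - 1) (a - rem) hreach hij' hj'
          (by rw [hseg]; omega)
      apply ih (i + p.length) (by omega) hq
      have h1 : i + p.length - 1 + 1 = i + p.length := by omega
      have h2 : (a - rem) + pvSeg L i (i + p.length - 1) = a - (rem - pvVal 0 p) := by
        rw [hseg]; ring
      rw [h1, h2] at hstep
      exact hstep
  have h0 : pvReach L a 0 (a - a) := by simpa using pvReach.zero
  exact main L a h 0 (by omega) rfl h0


-- ----- A side: the dp loops compute pvRB -----

theorem pvGetD_set (dp : List (PySem.Set Int)) (m k : Nat) (x : PySem.Set Int)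
    (hm : m < dp.length) : (dp.set m x).getD k [] = if k = m then x else dp.getD k [] := by
  by_cases h : k = m
  · subst h
    simp [List.getD_eq_getElem?_getD, hm]
  · simp [List.getD_eq_getElem?_getD,
      show m ≠ k from fun he => h he.symm]
    exact fun he => absurd he h


theorem pvInner_spec (a : Int) (L : List Int) (hL : ∀ d ∈ L, 0 ≤ d) (b : Nat) :
    ∀ (fuel j : Nat) (cur : Int) (dp : List (PySem.Set Int)),
      fuel = L.length - j → b ≤ j → j ≤ L.length →
      cur = pvVal 0 ((L.drop b).take (j - b)) →
      dp.length = L.length + 1 →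
      (pvInnerA a L b fuel j cur dp).length = L.length + 1 ∧
      ∀ (k : Nat) (v : Int),
        v ∈ (pvInnerA a L b fuel j cur dp).getD k [] ↔
          v ∈ dp.getD k [] ∨
            ∃ j', j ≤ j' ∧ j' < L.length ∧ k = j' + 1 ∧
              ∃ w ∈ dp.getD b [], v = w + pvSeg L b j' ∧ v ≤ a ∧ pvSeg L b j' ≤ a := by
  intro fuel
  induction fuel with
  | zero =>
    intro j cur dp hfuel hbj hjn hcur hdp
    refine ⟨hdp, fun k v => ?_⟩
    simp only [pvInnerA]
    constructor
    · exact Or.inl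
    · rintro (h | ⟨j', hjj', hj', -, -⟩)
      · exact h
      · omega
  | succ fuel ih =>
    intro j cur dp hfuel hbj hjn hcur hdp
    have hjlt : j < L.length := by omega
    -- the new accumulator value is the segment value L[b..j]
    have hcur' : cur * 10 + L.getD j 0 = pvSeg L b j := by
      have htake : (L.drop b).take (j + 1 - b) =
          (L.drop b).take (j - b) ++ [L.getD j 0] := by
        have h1 : j + 1 - b = (j - b) + 1 := by omega
        rw [h1, List.take_add_one]
        congr 1
        have hbj' : b + (j - b) = j := by omega
        rw [List.getElem?_drop, hbj']
        rw [List.getElem?_eq_getElem hjlt]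
        simp [List.getD_eq_getElem?_getD, List.getElem?_eq_getElem hjlt]
      subst hcur
      unfold pvSeg pvVal
      rw [htake, List.foldl_append]
      rfl
    simp only [pvInnerA]
    by_cases hbr : a < cur * 10 + L.getD j 0
    · rw [if_pos hbr]
      refine ⟨hdp, fun k v => ?_⟩
      constructor
      · exact Or.inl
      · rintro (h | ⟨j', hjj', hj', -, -, -, -, hsega⟩)
        · exact h
        · have := pvSeg_mono L hL b j j' hbj hjj'
          rw [← hcur'] at this
          omega
    · rw [if_neg hbr]
      set s : PySem.Set Int :=
        PySem.Set.ofList (((dp.getD b []).filter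
          (fun v => decide (v + (cur * 10 + L.getD j 0) ≤ a))).map
          (fun v => v + (cur * 10 + L.getD j 0))) with hs
      set dp3 := dp.set (j + 1) (PySem.Set.union (dp.getD (j + 1) []) s) with hdp3
      have hdp3len : dp3.length = L.length + 1 := by
        rw [hdp3, List.length_set, hdp]
      have hget3 : ∀ k, dp3.getD k [] =
          if k = j + 1 then PySem.Set.union (dp.getD (j + 1) []) s else dp.getD k [] := by
        intro k
        rw [hdp3]
        exact pvGetD_set dp (j + 1) k _ (by omega)
      have hget3b : dp3.getD b [] = dp.getD b [] := by
        rw [hget3]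
        rw [if_neg (by omega)]
      have hmem3 : ∀ (k : Nat) (v : Int), v ∈ dp3.getD k [] ↔
          v ∈ dp.getD k [] ∨
            (k = j + 1 ∧ ∃ w ∈ dp.getD b [], v = w + pvSeg L b j ∧ v ≤ a) := by
        intro k v
        rw [hget3]
        by_cases hk : k = j + 1
        · subst hk
          rw [if_pos rfl]
          rw [PySem.Set.mem_union]
          constructor
          · rintro (h | h)
            · exact Or.inl h
            · rw [hs, PySem.Set.mem_ofList] at h
              rcases List.mem_map.mp h with ⟨w, hw, rfl⟩
              rcases List.mem_filter.mp hw with ⟨hwmem, hwle⟩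
              rw [decide_eq_true_eq] at hwle
              exact Or.inr ⟨rfl, w, hwmem, by rw [hcur'], by omega⟩
          · rintro (h | ⟨-, w, hw, rfl, hva⟩)
            · exact Or.inl h
            · refine Or.inr ?_
              rw [hs, PySem.Set.mem_ofList]
              refine List.mem_map.mpr ⟨w, List.mem_filter.mpr ⟨hw, ?_⟩, by rw [hcur']⟩
              rw [decide_eq_true_eq]
              rw [hcur']
              omega
        · rw [if_neg hk]
          constructor
          · exact Or.inl
          · rintro (h | ⟨hk', -⟩)
            · exact h
            · exact absurd hk' hk
      obtain ⟨hlen', hiff⟩ := ih (j + 1) (cur * 10 + L.getD j 0) dp3 (by omega) (by omega)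
        (by omega) (by rw [hcur']; rfl) hdp3len
      refine ⟨hlen', fun k v => ?_⟩
      rw [hiff k v]
      have hsegja : pvSeg L b j ≤ a := by rw [← hcur']; omega
      constructor
      · rintro (h3 | ⟨j', hjj', hj', hk, w, hw, hveq, hva, hsa⟩)
        · rcases (hmem3 k v).mp h3 with h | ⟨hk, w, hw, hveq, hva⟩
          · exact Or.inl h
          · exact Or.inr ⟨j, le_rfl, hjlt, hk, w, hw, hveq, hva, hsegja⟩
        · rw [hget3b] at hw
          exact Or.inr ⟨j', by omega, hj', hk, w, hw, hveq, hva, hsa⟩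
      · rintro (h | ⟨j', hjj', hj', hk, w, hw, hveq, hva, hsa⟩)
        · exact Or.inl ((hmem3 k v).mpr (Or.inl h))
        · by_cases hjj : j' = j
          · subst hjj
            exact Or.inl ((hmem3 k v).mpr (Or.inr ⟨hk, w, hw, hveq, hva⟩))
          · refine Or.inr ⟨j', by omega, hj', hk, w, ?_, hveq, hva, hsa⟩
            rw [hget3b]
            exact hw

def pvInv (a : Int) (L : List Int) (b : Nat) (dp : List (PySem.Set Int)) : Prop :=
  dp.length = L.length + 1 ∧ ∀ k v, v ∈ dp.getD k [] ↔ pvRB L a b k v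

theorem pvReach_inv (L : List Int) (a : Int) (k : Nat) (v : Int) (h : pvReach L a k v) :
    (k = 0 ∧ v = 0) ∨
      ∃ i j w, i ≤ j ∧ j < L.length ∧ k = j + 1 ∧ pvReach L a i w ∧
        v = w + pvSeg L i j ∧ v ≤ a := by
  cases h with
  | zero => exact Or.inl ⟨rfl, rfl⟩
  | step i j w h hij hj hle => exact Or.inr ⟨i, j, w, hij, hj, rfl, h, rfl, hle⟩

theorem pvRB_reach (L : List Int) (a : Int) (b k : Nat) (v : Int) (h : pvRB L a b k v) :
    pvReach L a k v := by
  rcases h with ⟨rfl, rfl⟩ | ⟨i, j, w, hib, hij, hj, rfl, hr, rfl, hle⟩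
  · exact pvReach.zero
  · exact pvReach.step i j w hr hij hj hle

theorem pvRB_le (L : List Int) (a : Int) (b k : Nat) (v : Int) (hk : k ≤ b) :
    pvRB L a b k v ↔ pvReach L a k v := by
  constructor
  · exact pvRB_reach L a b k v
  · intro h
    rcases pvReach_inv L a k v h with ⟨rfl, rfl⟩ | ⟨i, j, w, hij, hj, rfl, hr, rfl, hle⟩
    · exact Or.inl ⟨rfl, rfl⟩
    · exact Or.inr ⟨i, j, w, by omega, hij, hj, rfl, hr, rfl, hle⟩


theorem pvInv_step (a : Int) (L : List Int) (hL : ∀ d ∈ L, 0 ≤ d) (b : Nat)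
    (dp : List (PySem.Set Int)) (hb : b < L.length) (h : pvInv a L b dp) :
    pvInv a L (b + 1) (pvInnerA a L b (L.length - b) b 0 dp) := by
  obtain ⟨hlen, hiff⟩ := h
  obtain ⟨hlen', hiff'⟩ := pvInner_spec a L hL b (L.length - b) b 0 dp rfl le_rfl
    (by omega) (by simp [pvVal]) hlen
  refine ⟨hlen', fun k v => ?_⟩
  rw [hiff' k v]
  constructor
  · rintro (h | ⟨j', hjj', hj', hk, w, hw, hveq, hva, hsa⟩)
    · rcases (hiff k v).mp h with ⟨rfl, rfl⟩ | ⟨i, j, w, hib, hij, hj, hk, hr, hveq, hva⟩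
      · exact Or.inl ⟨rfl, rfl⟩
      · exact Or.inr ⟨i, j, w, by omega, hij, hj, hk, hr, hveq, hva⟩
    · have hrw : pvReach L a b w := ((pvRB_le L a b b w le_rfl).mp ((hiff b w).mp hw))
      exact Or.inr ⟨b, j', w, by omega, hjj', hj', hk, hrw, hveq, hva⟩
  · rintro (⟨rfl, rfl⟩ | ⟨i, j, w, hib, hij, hj, hk, hr, hveq, hva⟩)
    · exact Or.inl ((hiff 0 0).mpr (Or.inl ⟨rfl, rfl⟩))
    · by_cases hib' : i < b
      · exact Or.inl ((hiff k v).mpr (Or.inr ⟨i, j, w, hib', hij, hj, hk, hr, hveq, hva⟩))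
      · have : i = b := by omega
        subst this
        have hw0 : 0 ≤ w := pvReach_nonneg L a hL i w hr
        refine Or.inr ⟨j, hij, hj, hk, w, (hiff i w).mpr ((pvRB_le L a i i w le_rfl).mpr hr),
          hveq, hva, by omega⟩

theorem pvOuter_iff (a : Int) (L : List Int) (hL : ∀ d ∈ L, 0 ≤ d) :
    ∀ (fuel b : Nat) (dp : List (PySem.Set Int)), fuel = L.length - b → b < L.length →
      pvInv a L b dp →
      (pvOuterA a L L.length fuel b dp = true ↔ pvReach L a L.length a) := by
  intro fuel
  induction fuel with
  | zero => intro b dp hfuel hb hInv; omega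
  | succ fuel ih =>
    intro b dp hfuel hb hInv
    have hInv' := pvInv_step a L hL b dp hb hInv
    simp only [pvOuterA]
    by_cases hmem : a ∈ (pvInnerA a L b (L.length - b) b 0 dp).getD L.length []
    · rw [if_pos ((PySem.Set.contains_iff _ _).mpr hmem)]
      simp only [true_iff]
      exact pvRB_reach L a (b + 1) L.length a ((hInv'.2 L.length a).mp hmem)
    · rw [if_neg (by
        intro hc
        exact hmem ((PySem.Set.contains_iff _ _).mp hc))]
      by_cases hb1 : b + 1 < L.length
      · exact ih (b + 1) _ (by omega) hb1 hInv'
      · have hbn : b + 1 = L.length := by omega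
        have hf0 : fuel = 0 := by omega
        subst hf0
        simp only [pvOuterA, Bool.false_eq_true, false_iff]
        intro hr
        apply hmem
        apply (hInv'.2 L.length a).mpr
        rw [hbn]
        exact (pvRB_le L a L.length L.length a le_rfl).mpr hr

-- ----- digits of str(a*a) are nonempty digit characters -----

theorem pvToDigitsCore_len (b : Nat) :
    ∀ (f n : Nat) (l : List Char), l.length ≤ (Nat.toDigitsCore b f n l).length := by
  intro f
  induction f with
  | zero => intro n l; simp [Nat.toDigitsCore]
  | succ f ih =>
    intro n l
    simp only [Nat.toDigitsCore]
    split
    · simp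
    · exact le_trans (by simp) (ih (n / b) (Nat.digitChar (n % b) :: l))

theorem pvToDigits_ne_nil (n : Nat) : Nat.toDigits 10 n ≠ [] := by
  unfold Nat.toDigits
  simp only [Nat.toDigitsCore]
  split
  · simp
  · intro h
    have := pvToDigitsCore_len 10 n (n / 10) (Nat.digitChar (n % 10) :: [])
    rw [h] at this
    simp at this

theorem pvToDigitsCore_mem (f : Nat) :
    ∀ (n : Nat) (l : List Char) (c : Char), c ∈ Nat.toDigitsCore 10 f n l →
      c ∈ l ∨ ∃ k, k < 10 ∧ c = Nat.digitChar k := by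
  induction f with
  | zero => intro n l c h; exact Or.inl (by simpa [Nat.toDigitsCore] using h)
  | succ f ih =>
    intro n l c h
    simp only [Nat.toDigitsCore] at h
    split at h
    · rcases (List.mem_cons.mp h) with h | h
      · exact Or.inr ⟨n % 10, Nat.mod_lt _ (by norm_num), h⟩
      · exact Or.inl h
    · rcases ih (n / 10) (Nat.digitChar (n % 10) :: l) c h with h | h
      · rcases List.mem_cons.mp h with h | h
        · exact Or.inr ⟨n % 10, Nat.mod_lt _ (by norm_num), h⟩
        · exact Or.inl h
      · exact Or.inr h

theorem pvDigitChar_ge (k : Nat) (hk : k < 10) : 48 ≤ (Nat.digitChar k).toNat := by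
  interval_cases k <;> decide

theorem pvToChars_sq (a : Int) : PySem.Int.toChars (a * a) = Nat.toDigits 10 (a * a).toNat := by
  unfold PySem.Int.toChars
  rw [if_neg (not_lt.mpr (mul_self_nonneg a))]

theorem pvDigits_nonneg (a : Int) : ∀ d ∈ pvDigitsA a, 0 ≤ d := by
  intro d hd
  unfold pvDigitsA at hd
  rw [pvToChars_sq] at hd
  rcases List.mem_map.mp hd with ⟨c, hc, rfl⟩
  unfold Nat.toDigits at hc
  rcases pvToDigitsCore_mem _ _ _ _ hc with h | ⟨k, hk, rfl⟩
  · simp at h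
  · have := pvDigitChar_ge k hk
    unfold pvDigit
    omega

theorem pvDigits_ne_nil (a : Int) : pvDigitsA a ≠ [] := by
  unfold pvDigitsA
  rw [pvToChars_sq]
  simp [pvToDigits_ne_nil]

-- ----- assembly -----

theorem pvCore (L : List Int) (a : Int) (hL : ∀ d ∈ L, 0 ≤ d) (hne : L ≠ []) :
    pvOuterA a L L.length L.length 0
        ((List.replicate (L.length + 1) (PySem.Set.empty : PySem.Set Int)).set 0
          (PySem.Set.add PySem.Set.empty 0)) = pvDfsB L a := by
  have hn : 0 < L.length := List.length_pos_iff.mpr hne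
  have hadd : PySem.Set.add PySem.Set.empty (0 : Int) = [0] := rfl
  have hInv0 : pvInv a L 0 ((List.replicate (L.length + 1) (PySem.Set.empty : PySem.Set Int)).set 0
      (PySem.Set.add PySem.Set.empty 0)) := by
    constructor
    · simp [List.length_set, List.length_replicate]
    · intro k v
      rw [pvGetD_set _ 0 k _ (by simp)]
      have hrep : (List.replicate (L.length + 1) (PySem.Set.empty : PySem.Set Int)).getD k [] = [] := by
        simp [List.getD_eq_getElem?_getD, List.getElem?_replicate]
        split <;> rfl
      by_cases hk : k = 0
      · subst hk
        rw [if_pos rfl, hadd]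
        constructor
        · intro h
          simp at h
          exact Or.inl ⟨rfl, h⟩
        · rintro (⟨-, rfl⟩ | ⟨i, j, w, hib, -⟩)
          · simp
          · omega
      · rw [if_neg hk, hrep]
        constructor
        · intro h; simp at h
        · rintro (⟨hk', -⟩ | ⟨i, j, w, hib, -⟩)
          · exact absurd hk' hk
          · omega
  rw [Bool.eq_iff_iff]
  rw [pvOuter_iff a L hL L.length 0 _ (by omega) hn hInv0]
  rw [pvDfsB_iff L hL a]
  exact ⟨pvReach_to_comp L a, pvComp_to_reach L a⟩

-- ===== VERDICT (by name: the statement is the Claim_ definition above) =====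
theorem isPu_spec : Claim_equal_isPu := by
  intro a _
  show isPu a = isPu_alt a
  unfold isPu isPu_alt
  exact pvCore (pvDigitsA a) a (pvDigits_nonneg a) (pvDigits_ne_nil a)
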